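-- pv_equiv track=rewrite | github.com/TheDingodile/Poker_project | src/utils.py | argsorted_index_lists
-- ===== SOURCE A (Python) =====
-- def argsorted_index_lists(nums):
--     # Create a dictionary to store indices of numbers
--     num_indices = {}
--     for i, num in enumerate(nums):
--         if num in num_indices:
--             num_indices[num].append(i)
--         else:
--             num_indices[num] = [i]
--
--     # Sort the dictionary keys (numbers)
--     sorted_nums = sorted(num_indices.keys())
--
--     # Create tuples of indices for each number
--     result = []
--     for num in sorted_nums:
--         result.append(list(num_indices[num]))
--
--     return result
-- ===== SOURCE B (Python) =====
-- def argsorted_index_lists(nums):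
--     # Simpler: one filtering pass per distinct value, values from sorted(set(...)).
--     return [[i for i, x in enumerate(nums) if x == v] for v in sorted(set(nums))]
-- ===== Notes on version B (the rewrite author's own statement) =====
-- stated objective: simpler
-- what changed: Replaces the dict-of-index-lists grouping pass plus key sort with a one-line comprehension: sorted(set(nums)) gives the distinct values in order and one enumerate-filter per value collects its indices.
import Mathlib
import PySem

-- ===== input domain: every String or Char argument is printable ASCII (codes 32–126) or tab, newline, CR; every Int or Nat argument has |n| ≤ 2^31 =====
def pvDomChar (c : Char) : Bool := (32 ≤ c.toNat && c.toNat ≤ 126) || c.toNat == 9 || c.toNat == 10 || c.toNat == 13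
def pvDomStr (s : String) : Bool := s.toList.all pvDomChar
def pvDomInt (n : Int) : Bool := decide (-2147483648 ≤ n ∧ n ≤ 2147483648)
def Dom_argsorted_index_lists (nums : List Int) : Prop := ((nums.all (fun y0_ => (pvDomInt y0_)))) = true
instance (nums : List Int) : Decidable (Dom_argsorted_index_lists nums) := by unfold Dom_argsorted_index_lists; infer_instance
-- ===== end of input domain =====

-- B replaces A's dict-of-index-lists grouping pass plus key sort by a single map over
-- sorted(set(nums)) with one enumerate-filter per distinct value (objective: simpler).


-- ===== PORT A =====
def argsorted_index_lists (nums : List Int) : List (List Int) :=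
  let num_indices : PySem.Dict Int (List Int) :=
    (PySem.List.enumerate nums).foldl
      (fun d p =>
        if d.contains p.2 then d.modify p.2 [] (fun l => l ++ [p.1])
        else d.insert p.2 [p.1])
      PySem.Dict.empty
  let sorted_nums := PySem.List.sorted num_indices.keys (fun x => x) false
  sorted_nums.foldl (fun result num => result ++ [num_indices.getD num []]) []

-- ===== PORT B =====
def argsorted_index_lists_alt (nums : List Int) : List (List Int) :=
  (PySem.List.sorted (PySem.Set.ofList nums) (fun x => x) false).map
    (fun v => ((PySem.List.enumerate nums).filter (fun p => p.2 == v)).map (fun p => p.1))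

-- ===== PRECONDITION & SPEC =====
def Spec_argsorted_index_lists (nums : List Int) (out : List (List Int)) : Prop := out = argsorted_index_lists_alt nums
instance (nums : List Int) (out : List (List Int)) : Decidable (Spec_argsorted_index_lists nums out) := by unfold Spec_argsorted_index_lists; infer_instance

-- ===== CLAIM (what is proved, stated in full; the proofs are below) =====
def Claim_equal_argsorted_index_lists : Prop := ∀ (nums : List Int), Dom_argsorted_index_lists nums → Spec_argsorted_index_lists nums (argsorted_index_lists nums)

-- ===== LEMMAS AND PROOFS =====

-- A's if-contains-append / else-insert step is Dict.modify with default [].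
lemma step_eq_modify (d : PySem.Dict Int (List Int)) (p : Int × Int) :
    (if d.contains p.2 then d.modify p.2 [] (fun l => l ++ [p.1])
     else d.insert p.2 [p.1]) = d.modify p.2 [] (fun l => l ++ [p.1]) := by
  by_cases h : d.contains p.2
  · simp [PySem.Dict.modify, PySem.Dict.insert, h]
  · simp [PySem.Dict.modify, PySem.Dict.insert, h,
      PySem.Dict.getD_of_not_contains d ([] : List Int) (by simpa using h)]

-- A's dict maps each value to the indices at which it occurs, in order.
lemma dict_getD (nums : List Int) (v : Int) :
    ((PySem.List.enumerate nums).foldl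
      (fun d p => d.modify p.2 [] (fun l => l ++ [p.1])) PySem.Dict.empty).getD v []
    = ((PySem.List.enumerate nums).filter (fun p => p.2 == v)).map (fun p => p.1) := by
  have h1 : ((PySem.List.enumerate nums).foldl
      (fun d p => d.modify p.2 [] (fun l => l ++ [p.1])) PySem.Dict.empty)
      = (((PySem.List.enumerate nums).map Prod.swap).foldl
      (fun d p => d.modify p.1 [] (fun x => x ++ [p.2])) PySem.Dict.empty) := by
    rw [List.foldl_map]
    simp
  rw [h1, PySem.Dict.getD_foldl_modify_append]
  simp [List.filter_map, List.map_map, Function.comp_def]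

-- A's dict keys are the distinct values in first-occurrence order, i.e. set(nums).
lemma dict_keys (nums : List Int) :
    ((PySem.List.enumerate nums).foldl
      (fun d p => d.modify p.2 [] (fun l => l ++ [p.1])) PySem.Dict.empty).keys
    = PySem.Set.ofList nums := by
  have h := PySem.Dict.keys_foldl_modify_key (PySem.List.enumerate nums)
    (fun p => p.2) [] (fun _ p l => l ++ [p.1]) PySem.Dict.empty
  simpa [PySem.Set.update, PySem.Set.ofList_eq_foldl, PySem.List.map_snd_enumerate] using h

-- ===== VERDICT (by name: the statement is the Claim_ definition above) =====
theorem argsorted_index_lists_spec : Claim_equal_argsorted_index_lists := by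
  intro nums _
  unfold Spec_argsorted_index_lists argsorted_index_lists argsorted_index_lists_alt
  have hstep : (PySem.List.enumerate nums).foldl
      (fun d p => if d.contains p.2 then d.modify p.2 [] (fun l => l ++ [p.1])
        else d.insert p.2 [p.1]) PySem.Dict.empty
      = (PySem.List.enumerate nums).foldl
      (fun d p => d.modify p.2 [] (fun l => l ++ [p.1])) PySem.Dict.empty :=
    PySem.List.foldl_congr_mem _ _ _ _ (fun acc x _ => step_eq_modify acc x)
  simp only [hstep, PySem.List.foldl_append_singleton_eq_map, dict_keys, dict_getD,
    List.nil_append]
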